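-- pv_equiv track=rewrite | github.com/tjdgus3160/algorithm | BOJ/Silver3/1.py | func
-- ===== SOURCE A (Python) =====
-- def func(n):
--     if n==1:
--         return 1
--     k=int('1'*(len(str(n))+1))
--     cnt=len(str(k))
--     while True:
--         if k%n==0:
--             return cnt
--         k+=10**cnt
--         cnt+=1
-- ===== SOURCE B (Python) =====
-- def func(n):
--     if n == 1:
--         return 1
--     length = len(str(n)) + 1
--     r = 0
--     for _ in range(length):
--         r = (r * 10 + 1) % n
--     while r != 0:
--         r = (r * 10 + 1) % n
--         length += 1
--     return length
-- ===== Notes on version B (the rewrite author's own statement) =====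
-- stated objective: alternative
-- what changed: B tracks only the repunit's current remainder modulo n via r = (r*10+1) % n instead of growing the repunit itself as a bigint and reducing that bigint each iteration.
import Mathlib
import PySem

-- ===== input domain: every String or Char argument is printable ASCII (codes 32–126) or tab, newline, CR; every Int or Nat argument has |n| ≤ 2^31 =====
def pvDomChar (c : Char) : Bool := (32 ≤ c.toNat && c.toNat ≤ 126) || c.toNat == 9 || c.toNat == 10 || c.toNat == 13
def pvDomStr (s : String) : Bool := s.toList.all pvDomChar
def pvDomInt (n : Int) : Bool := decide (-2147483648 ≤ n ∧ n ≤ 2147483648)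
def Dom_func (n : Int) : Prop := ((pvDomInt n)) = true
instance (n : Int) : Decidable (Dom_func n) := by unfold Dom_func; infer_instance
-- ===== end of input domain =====

-- B replaces A's growing-bigint repunit by modular remainder tracking (r = (r*10+1) % n); same return value.

-- ===== PORT A =====
-- int('1'*m): int() of a nonempty all-digit string is ported by hand as the fold a*10+digit (exact there).
def pyIntOfDigits (cs : List Char) : Int :=
  cs.foldl (fun a c => a * 10 + ((c.toNat : Int) - 48)) 0

-- the `while True` loop; the fuel argument is only a totality guard (the Python loop terminates within it on Pre_)
def funcLoopA (n k cnt : Int) : Nat → Int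
  | 0 => 0
  | fuel + 1 =>
    if PySem.Int.mod k n == 0 then cnt
    else funcLoopA n (k + 10 ^ cnt.toNat) (cnt + 1) fuel

def func (n : Int) : Int :=
  if n == 1 then 1
  else
    let k := pyIntOfDigits (List.replicate ((PySem.Int.toChars n).length + 1) '1')
    let cnt : Int := ((PySem.Int.toChars k).length : Int)
    funcLoopA n k cnt (9 * n.natAbs + 10)

-- ===== PORT B =====
-- the `while r != 0` loop; fuel is the same totality guard
def funcLoopB (n r length : Int) : Nat → Int
  | 0 => 0
  | fuel + 1 =>
    if r == 0 then length
    else funcLoopB n (PySem.Int.mod (r * 10 + 1) n) (length + 1) fuel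

def func_alt (n : Int) : Int :=
  if n == 1 then 1
  else
    let len : Int := ((PySem.Int.toChars n).length : Int) + 1
    let r := (List.range len.toNat).foldl (fun r _ => PySem.Int.mod (r * 10 + 1) n) 0
    funcLoopB n r len (9 * n.natAbs + 10)

-- ===== PRECONDITION & SPEC =====
-- Pre_ excludes zero (Python A raises ZeroDivisionError there) and integers sharing a prime
-- factor with ten (no repunit is divisible by such n, so A's `while True` loop never returns).
def Pre_func (n : Int) : Prop := n ≠ 0 ∧ Int.gcd n 10 = 1
instance (n : Int) : Decidable (Pre_func n) := by unfold Pre_func; infer_instance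
def pvWitness_func : Int := 3
def Spec_func (n : Int) (out : Int) : Prop := out = func_alt n
instance (n : Int) (out : Int) : Decidable (Spec_func n out) := by unfold Spec_func; infer_instance

-- ===== CLAIM (what is proved, stated in full; the proofs are below) =====
def Claim_equal_func : Prop := ∀ (n : Int), Dom_func n → Pre_func n → Spec_func n (func n)

-- ===== LEMMAS AND PROOFS =====

-- the repunit 1…1 with m digits
def repu : Nat → Nat
  | 0 => 0
  | m + 1 => 10 * repu m + 1

theorem repu_ident (m : Nat) : 9 * repu m + 1 = 10 ^ m := by
  induction m with
  | zero => rfl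
  | succ m ih => simp only [repu, pow_succ]; omega

theorem repu_succ' (m : Nat) : (repu (m + 1) : Int) = (repu m : Int) + 10 ^ m := by
  have h := repu_ident m
  have : repu (m + 1) = repu m + 10 ^ m := by simp only [repu]; omega
  rw [this]; push_cast; ring

theorem fold_digits (m : Nat) (a : Int) :
    (List.replicate m '1').foldl (fun a c => a * 10 + ((c.toNat : Int) - 48)) a
      = a * 10 ^ m + (repu m : Int) := by
  induction m generalizing a with
  | zero => simp [repu]
  | succ m ih =>
    rw [List.replicate_succ, List.foldl_cons, ih]
    have h9 : (9 : Int) * (repu m : Int) + 1 = 10 ^ m := by exact_mod_cast repu_ident m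
    simp only [repu]; push_cast; rw [pow_succ]; nlinarith [h9]

theorem toDigitsCore_len (f : Nat) : ∀ n : Nat, n < f →
    (Nat.toDigitsCore 10 f n []).length = Nat.log 10 n + 1 := by
  induction f with
  | zero => intro n h; omega
  | succ f ih =>
    intro n h
    simp only [Nat.toDigitsCore]
    by_cases hx : n / 10 = 0
    · have hn : n < 10 := by omega
      simp [hx, Nat.log_eq_zero_iff, hn]
    · have hn : 10 ≤ n := by omega
      rw [if_neg hx, Nat.toDigitsCore_lens_eq,
        ih (n / 10) (by have := Nat.div_lt_self (by omega : 0 < n) (by omega : 1 < 10); omega),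
        Nat.log_div_base]
      have : 0 < Nat.log 10 n := Nat.log_pos (by omega) hn
      omega

theorem toChars_len_pos (k : Int) (hk : 0 < k) :
    (PySem.Int.toChars k).length = Nat.log 10 k.toNat + 1 := by
  rw [PySem.Int.toChars, if_neg (by omega)]
  exact toDigitsCore_len _ _ (Nat.lt_succ_self _)

theorem log_repu (m : Nat) : Nat.log 10 (repu (m + 1)) = m := by
  have h := repu_ident (m + 1)
  have h' := repu_ident m
  have hge : 10 ^ m ≤ repu (m + 1) := by
    simp only [repu] at h ⊢; omega
  exact Nat.log_eq_of_pow_le_of_lt_pow hge (by omega)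

theorem mod_congr (n a b : Int) (h : n ∣ a - b) :
    PySem.Int.mod a n = PySem.Int.mod b n := by
  obtain ⟨t, ht⟩ := h
  have : a = b + n * t := by linarith
  subst this
  simp [PySem.Int.mod, Int.add_mul_fmod_self_left]

theorem dvd_mod_sub (n x : Int) : n ∣ PySem.Int.mod x n - x := by
  refine ⟨-(PySem.Int.floordiv x n), ?_⟩
  have := PySem.Int.floordiv_mul_add_mod x n
  linarith

theorem step_congr (n x : Int) :
    PySem.Int.mod (PySem.Int.mod x n * 10 + 1) n = PySem.Int.mod (x * 10 + 1) n := by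
  apply mod_congr
  have h := dvd_mod_sub n x
  have : PySem.Int.mod x n * 10 + 1 - (x * 10 + 1) = (PySem.Int.mod x n - x) * 10 := by ring
  rw [this]
  exact Dvd.dvd.mul_right h 10

theorem init_fold (n : Int) (m : Nat) :
    (List.range m).foldl (fun r _ => PySem.Int.mod (r * 10 + 1) n) 0
      = PySem.Int.mod (repu m : Int) n := by
  induction m with
  | zero => simp [repu, PySem.Int.mod]
  | succ m ih =>
    rw [List.range_succ, List.foldl_append, List.foldl_cons, List.foldl_nil, ih, step_congr]
    congr 1
    simp only [repu]; push_cast; ring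

theorem loops_eq (n : Int) : ∀ (fuel : Nat) (c : Nat),
    funcLoopA n (repu c : Int) (c : Int) fuel
      = funcLoopB n (PySem.Int.mod (repu c : Int) n) (c : Int) fuel := by
  intro fuel
  induction fuel with
  | zero => intro c; rfl
  | succ fuel ih =>
    intro c
    simp only [funcLoopA, funcLoopB]
    by_cases h : PySem.Int.mod (repu c : Int) n = 0
    · rw [if_pos (by simpa using h), if_pos (by simpa using h)]
    · rw [if_neg (by simpa using h), if_neg (by simpa using h)]
      have hk : (repu c : Int) + 10 ^ ((c : Int)).toNat = (repu (c + 1) : Int) := by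
        rw [Int.toNat_natCast, repu_succ']
      have hr : PySem.Int.mod (PySem.Int.mod (repu c : Int) n * 10 + 1) n
          = PySem.Int.mod (repu (c + 1) : Int) n := by
        rw [step_congr]; congr 1
        simp only [repu]; push_cast; ring
      rw [hk]
      have hc1 : ((c : Int)) + 1 = ((c + 1 : Nat) : Int) := by push_cast; ring
      rw [hc1, ih (c + 1), hr]

theorem repu_pos (m : Nat) : 0 < repu (m + 1) := by
  simp only [repu]; omega

theorem func_eq_alt (n : Int) (hn : n ≠ 1) : func n = func_alt n := by
  have hne : (n == 1) = false := by simpa using hn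
  rw [func, func_alt, hne]
  simp only [Bool.false_eq_true, if_false]
  set m := (PySem.Int.toChars n).length with hm
  have hk : pyIntOfDigits (List.replicate (m + 1) '1') = (repu (m + 1) : Int) := by
    rw [pyIntOfDigits, fold_digits]; ring
  have hcnt : ((PySem.Int.toChars ((repu (m + 1) : Nat) : Int)).length : Int)
      = ((m + 1 : Nat) : Int) := by
    rw [toChars_len_pos _ (by exact_mod_cast repu_pos m), Int.toNat_natCast, log_repu]
  have hlen : ((m : Int) + 1) = ((m + 1 : Nat) : Int) := by push_cast; ring
  have htn : ((m : Int) + 1).toNat = m + 1 := by omega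
  rw [hk, hcnt, htn, init_fold, hlen]
  exact loops_eq n (9 * n.natAbs + 10) (m + 1)

-- ===== VERDICT (by name: the statement is the Claim_ definition above) =====
theorem func_spec : Claim_equal_func := by
  intro n _ _
  unfold Spec_func
  by_cases h1 : n = 1
  · subst h1; rfl
  · exact func_eq_alt n h1
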